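-- pv_equiv track=rewrite | github.com/prshnt-git/IRIP_MVP | irip_mvp_starter/backend/app/pipeline/aspect_rules.py | _should_skip_candidate
-- ===== SOURCE A (Python) =====
-- def _should_skip_candidate(aspect: str, term: str, lowered: str) -> bool:
--     # Avoid false performance extraction when lag is clearly UI/software related.
--     if aspect == "performance" and term == "lag":
--         software_context = any(word in lowered for word in ["ui", "software", "bug", "bugs"])
--         if software_context:
--             return True
--
--     # "gaming" can be performance context, but when the sentence is mainly
--     # about heat/garam/tawa/overheating, do not create a separate performance issue.
--     if aspect == "performance" and term == "gaming":
--         heating_context = any(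
--             word in lowered
--             for word in ["heat", "heating", "hot", "garam", "tawa", "overheat", "thermal"]
--         )
--         if heating_context:
--             return True
--
--     # "feel" alone can be vague; require design/build/premium/hand context.
--     if aspect == "design" and term == "feel":
--         design_context = any(
--             word in lowered
--             for word in ["design", "premium", "haath", "hand", "grip", "build", "back panel"]
--         )
--         if not design_context:
--             return True
--
--     # "drop" alone is only connectivity when network/call/signal context exists.
--     if aspect == "connectivity" and term == "drop":
--         network_context = any(
--             word in lowered for word in ["network", "call", "signal", "internet", "wifi", "wi-fi"]
--         )
--         if not network_context:
--             return True
--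
--     return False
-- ===== SOURCE B (Python) =====
-- # skip polarity per (aspect, term): True = skip when context present, False = skip when absent
-- _POLARITY = {
--     ("performance", "lag"): True,
--     ("performance", "gaming"): True,
--     ("design", "feel"): False,
--     ("connectivity", "drop"): False,
-- }
--
-- # flattened inverted index: context keyword -> the rule it belongs to
-- _KEYWORD_INDEX = [
--     ("ui", ("performance", "lag")),
--     ("software", ("performance", "lag")),
--     ("bug", ("performance", "lag")),
--     ("bugs", ("performance", "lag")),
--     ("heat", ("performance", "gaming")),
--     ("heating", ("performance", "gaming")),
--     ("hot", ("performance", "gaming")),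
--     ("garam", ("performance", "gaming")),
--     ("tawa", ("performance", "gaming")),
--     ("overheat", ("performance", "gaming")),
--     ("thermal", ("performance", "gaming")),
--     ("design", ("design", "feel")),
--     ("premium", ("design", "feel")),
--     ("haath", ("design", "feel")),
--     ("hand", ("design", "feel")),
--     ("grip", ("design", "feel")),
--     ("build", ("design", "feel")),
--     ("back panel", ("design", "feel")),
--     ("network", ("connectivity", "drop")),
--     ("call", ("connectivity", "drop")),
--     ("signal", ("connectivity", "drop")),
--     ("internet", ("connectivity", "drop")),
--     ("wifi", ("connectivity", "drop")),
--     ("wi-fi", ("connectivity", "drop")),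
-- ]
--
--
-- def _should_skip_candidate(aspect: str, term: str, lowered: str) -> bool:
--     polarity = _POLARITY.get((aspect, term))
--     if polarity is None:
--         return False
--     # one scan of the whole keyword index: which rules' contexts fired in this sentence
--     fired = [rule for word, rule in _KEYWORD_INDEX if word in lowered]
--     return ((aspect, term) in fired) == polarity
-- ===== Notes on version B (the rewrite author's own statement) =====
-- stated objective: alternative
-- what changed: Replaced the per-rule branch chain (each with its own any() over its word list) by an inverted keyword->rule index scanned once to collect the set of fired rule contexts, followed by a single polarity-dict lookup and one equality test.
import Mathlib
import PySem

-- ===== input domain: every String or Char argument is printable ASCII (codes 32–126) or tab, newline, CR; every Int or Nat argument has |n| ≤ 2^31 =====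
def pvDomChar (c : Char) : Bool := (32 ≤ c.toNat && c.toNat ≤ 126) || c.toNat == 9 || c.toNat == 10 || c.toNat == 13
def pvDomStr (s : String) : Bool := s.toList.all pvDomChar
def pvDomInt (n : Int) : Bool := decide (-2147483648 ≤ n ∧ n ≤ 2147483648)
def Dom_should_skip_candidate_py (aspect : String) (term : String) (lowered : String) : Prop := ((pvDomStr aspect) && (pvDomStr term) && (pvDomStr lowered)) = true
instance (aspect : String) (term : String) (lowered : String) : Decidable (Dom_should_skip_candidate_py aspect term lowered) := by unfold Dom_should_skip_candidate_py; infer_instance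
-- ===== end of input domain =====

-- B replaces the per-rule branch chain by an inverted keyword->rule index scanned once plus a polarity-dict lookup (objective: alternative).


-- ===== PORT A =====
-- Early-return chain: each block returns true on its own condition, otherwise falls through to the next.
def pvA_block4 (aspect : String) (term : String) (lowered : String) : Bool :=
  if aspect == "connectivity" && term == "drop" then
    let network_context := ["network", "call", "signal", "internet", "wifi", "wi-fi"].any (fun w => PySem.Str.isIn w lowered)
    if !network_context then true else false
  else false

def pvA_block3 (aspect : String) (term : String) (lowered : String) : Bool :=
  if aspect == "design" && term == "feel" then
    let design_context := ["design", "premium", "haath", "hand", "grip", "build", "back panel"].any (fun w => PySem.Str.isIn w lowered)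
    if !design_context then true else pvA_block4 aspect term lowered
  else pvA_block4 aspect term lowered

def pvA_block2 (aspect : String) (term : String) (lowered : String) : Bool :=
  if aspect == "performance" && term == "gaming" then
    let heating_context := ["heat", "heating", "hot", "garam", "tawa", "overheat", "thermal"].any (fun w => PySem.Str.isIn w lowered)
    if heating_context then true else pvA_block3 aspect term lowered
  else pvA_block3 aspect term lowered

def should_skip_candidate_py (aspect : String) (term : String) (lowered : String) : Bool :=
  if aspect == "performance" && term == "lag" then
    let software_context := ["ui", "software", "bug", "bugs"].any (fun w => PySem.Str.isIn w lowered)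
    if software_context then true else pvA_block2 aspect term lowered
  else pvA_block2 aspect term lowered

-- ===== PORT B =====
-- B: polarity dict per rule (True = skip when context present, False = skip when absent).
def pvB_polarity : PySem.Dict (String × String) Bool :=
  PySem.Dict.mk
    [(("performance", "lag"), true),
     (("performance", "gaming"), true),
     (("design", "feel"), false),
     (("connectivity", "drop"), false)]

-- B: flattened inverted index: context keyword -> the rule it belongs to.
def pvB_index : List (String × (String × String)) :=
  [("ui", ("performance", "lag")), ("software", ("performance", "lag")),
   ("bug", ("performance", "lag")), ("bugs", ("performance", "lag")),
   ("heat", ("performance", "gaming")), ("heating", ("performance", "gaming")),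
   ("hot", ("performance", "gaming")), ("garam", ("performance", "gaming")),
   ("tawa", ("performance", "gaming")), ("overheat", ("performance", "gaming")),
   ("thermal", ("performance", "gaming")),
   ("design", ("design", "feel")), ("premium", ("design", "feel")),
   ("haath", ("design", "feel")), ("hand", ("design", "feel")),
   ("grip", ("design", "feel")), ("build", ("design", "feel")),
   ("back panel", ("design", "feel")),
   ("network", ("connectivity", "drop")), ("call", ("connectivity", "drop")),
   ("signal", ("connectivity", "drop")), ("internet", ("connectivity", "drop")),
   ("wifi", ("connectivity", "drop")), ("wi-fi", ("connectivity", "drop"))]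

def should_skip_candidate_py_alt (aspect : String) (term : String) (lowered : String) : Bool :=
  match PySem.Dict.get? pvB_polarity (aspect, term) with
  | none => false
  | some polarity =>
      -- one scan of the whole keyword index: which rules' contexts fired in this sentence
      let fired := (pvB_index.filter (fun p => PySem.Str.isIn p.1 lowered)).map Prod.snd
      (fired.contains (aspect, term)) == polarity

-- ===== PRECONDITION & SPEC =====
def Spec_should_skip_candidate_py (aspect : String) (term : String) (lowered : String) (out : Bool) : Prop := out = should_skip_candidate_py_alt aspect term lowered
instance (aspect : String) (term : String) (lowered : String) (out : Bool) : Decidable (Spec_should_skip_candidate_py aspect term lowered out) := by unfold Spec_should_skip_candidate_py; infer_instance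

-- ===== CLAIM (what is proved, stated in full; the proofs are below) =====
def Claim_equal_should_skip_candidate_py : Prop := ∀ (aspect : String) (term : String) (lowered : String), Dom_should_skip_candidate_py aspect term lowered → Spec_should_skip_candidate_py aspect term lowered (should_skip_candidate_py aspect term lowered)

-- ===== LEMMAS AND PROOFS =====
-- Membership of a rule key in the filtered-then-projected index equals a single any over the index.
theorem pv_contains_filter_map (l : List (String × (String × String))) (p : String × (String × String) → Bool) (x : String × String) :
    ((l.filter p).map Prod.snd).contains x = l.any (fun a => p a && a.2 == x) := by
  induction l with
  | nil => rfl
  | cons h t ih =>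
      simp only [List.contains_eq_mem] at ih
      by_cases hp : p h
      · by_cases hx : h.2 = x
        · simp [hp, hx]
        · have h1 : (x == h.2) = false := beq_eq_false_iff_ne.mpr (fun h' => hx h'.symm)
          have h2 : (h.2 == x) = false := beq_eq_false_iff_ne.mpr hx
          simp [hp, h1, h2, ih]
      · simp [hp, ih]

-- ===== VERDICT (by name: the statement is the Claim_ definition above) =====
theorem should_skip_candidate_py_spec : Claim_equal_should_skip_candidate_py := by
  intro aspect term lowered _
  unfold Spec_should_skip_candidate_py
  unfold should_skip_candidate_py should_skip_candidate_py_alt pvA_block2 pvA_block3 pvA_block4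
  simp only [pv_contains_filter_map, pvB_index, pvB_polarity, PySem.Dict.get?]
  by_cases h1 : aspect = "performance" <;> by_cases h2 : aspect = "design" <;>
    by_cases h3 : aspect = "connectivity" <;>
    by_cases h4 : term = "lag" <;> by_cases h5 : term = "gaming" <;>
    by_cases h6 : term = "feel" <;> by_cases h7 : term = "drop" <;>
    simp_all [List.find?, List.any, beq_eq_decide, @eq_comm String]
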